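-- pv_equiv track=rewrite | github.com/MrPeterJin/ASlide | Aslide/mds/mdsx_slide.py | _get_length_without_trailing_zeros
-- ===== SOURCE A (Python) =====
-- def _get_length_without_trailing_zeros(data):
--     """Get length without trailing zeros"""
--     length = len(data)
--     while length > 1:
--         if data[length-2] == 0 and data[length-1] == 0:
--             length -= 2
--         else:
--             break
--     return length
-- ===== SOURCE B (Python) =====
-- def _get_length_without_trailing_zeros(data):
--     last = -1
--     for i, x in enumerate(data):
--         if x != 0:
--             last = i
--     t = len(data) - (last + 1)
--     return len(data) - 2 * (t // 2)
-- ===== Notes on version B (the rewrite author's own statement) =====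
-- stated objective: alternative
-- what changed: Replaces A's backward pair-at-a-time shrinking loop by a single FORWARD pass that tracks the index of the last nonzero element, then drops the whole zero pairs of the tail with the closed form len(data) - 2*((len(data)-last-1)//2).
import Mathlib
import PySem

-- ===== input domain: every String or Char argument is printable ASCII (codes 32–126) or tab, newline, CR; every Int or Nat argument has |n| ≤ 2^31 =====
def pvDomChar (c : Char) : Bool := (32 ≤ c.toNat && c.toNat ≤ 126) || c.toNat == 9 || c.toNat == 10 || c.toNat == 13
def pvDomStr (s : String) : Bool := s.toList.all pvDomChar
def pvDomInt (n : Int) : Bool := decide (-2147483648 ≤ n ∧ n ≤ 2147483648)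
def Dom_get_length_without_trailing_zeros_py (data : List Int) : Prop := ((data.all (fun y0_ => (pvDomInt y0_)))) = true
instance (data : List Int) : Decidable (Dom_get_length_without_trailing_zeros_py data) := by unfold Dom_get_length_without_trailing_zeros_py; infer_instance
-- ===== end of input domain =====

-- B replaces A's backward pair-at-a-time shrinking loop by one FORWARD pass tracking
-- the index of the last nonzero element plus closed-form arithmetic; objective: alternative.

-- ===== PORT A =====
-- the `while length > 1` loop; length starts at len(data) and drops by 2
def pvALoop (data : List Int) (length : Nat) : Int :=
  if h : 1 < length then
    if PySem.List.pyGet? data ((length : Int) - 2) == some 0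
        && PySem.List.pyGet? data ((length : Int) - 1) == some 0 then
      pvALoop data (length - 2)
    else (length : Int)
  else (length : Int)
termination_by length
decreasing_by omega

def get_length_without_trailing_zeros_py (data : List Int) : Int :=
  pvALoop data data.length

-- ===== PORT B =====
-- the `for i, x in enumerate(data)` pass updating `last`, then the closed form
def get_length_without_trailing_zeros_py_alt (data : List Int) : Int :=
  let last := (PySem.List.enumerate data).foldl
    (fun acc p => if p.2 ≠ 0 then p.1 else acc) (-1)
  let t := (data.length : Int) - (last + 1)
  (data.length : Int) - 2 * PySem.Int.floordiv t 2

-- ===== PRECONDITION & SPEC =====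
def Spec_get_length_without_trailing_zeros_py (data : List Int) (out : Int) : Prop := out = get_length_without_trailing_zeros_py_alt data
instance (data : List Int) (out : Int) : Decidable (Spec_get_length_without_trailing_zeros_py data out) := by unfold Spec_get_length_without_trailing_zeros_py; infer_instance

-- ===== CLAIM (what is proved, stated in full; the proofs are below) =====
def Claim_equal_get_length_without_trailing_zeros_py : Prop := ∀ (data : List Int), Dom_get_length_without_trailing_zeros_py data → Spec_get_length_without_trailing_zeros_py data (get_length_without_trailing_zeros_py data)

-- ===== LEMMAS AND PROOFS =====

-- proof helper: trailing-zero count among data's first n elements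
def pvZ (data : List Int) : Nat → Int
  | 0 => 0
  | n + 1 => if PySem.List.pyGet? data (n : Int) == some 0 then pvZ data n + 1 else 0

-- A's loop computes n - 2*(pvZ n // 2)
theorem pv_main_A (data : List Int) : ∀ n : Nat,
    pvALoop data n = (n : Int) - 2 * PySem.Int.floordiv (pvZ data n) 2 := by
  intro n
  induction n using Nat.strong_induction_on with
  | _ n ih =>
    match n with
    | 0 => simp [pvALoop, pvZ]
    | 1 =>
      rw [pvALoop]
      simp [pvZ]
      split <;> omega
    | m + 2 =>
      rw [pvALoop]
      have g2 : PySem.List.pyGet? data ((m : Int) + 1) = data[m+1]? := by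
        rw [show ((m : Int) + 1) = ((m + 1 : Nat) : Int) by push_cast; ring,
          PySem.List.pyGet?_natCast]
      have hc2 : ((m + 2 : Nat) : Int) - 2 = (m : Int) := by push_cast; ring
      have hc1 : ((m + 2 : Nat) : Int) - 1 = ((m : Int) + 1) := by push_cast; ring
      rw [dif_pos (show 1 < m + 2 by omega), hc2, hc1, g2]
      simp only [pvZ, PySem.List.pyGet?_natCast]
      by_cases h1 : data[m]? = some 0 <;> by_cases h2 : data[m+1]? = some 0 <;>
        simp [h1, h2, ih m (by omega)] <;> omega

-- pvZ only looks at indices below n, so appending one element does not change it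
theorem pvZ_append (data : List Int) (x : Int) :
    ∀ k, k ≤ data.length → pvZ (data ++ [x]) k = pvZ data k := by
  intro k hk
  induction k with
  | zero => rfl
  | succ k ih =>
    simp only [pvZ, PySem.List.pyGet?_natCast,
      List.getElem?_append_left (show k < data.length by omega)]
    rw [ih (by omega)]

-- B's forward fold computes (last nonzero index) = n - 1 - pvZ n
theorem pv_fold (data : List Int) :
    (PySem.List.enumerate data).foldl (fun acc p => if p.2 ≠ 0 then p.1 else acc) (-1)
      = (data.length : Int) - 1 - pvZ data data.length := by
  induction data using List.reverseRecOn with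
  | nil => simp [PySem.List.enumerate, pvZ]
  | append_singleton data x ih =>
    rw [PySem.List.enumerate_append, List.foldl_append, ih]
    simp only [List.length_append, List.length_singleton, pvZ,
      PySem.List.pyGet?_natCast,
      List.getElem?_append_right (show data.length ≤ data.length by omega)]
    rw [pvZ_append data x data.length (by omega)]
    by_cases hx : x = 0 <;>
      simp [hx, PySem.List.enumerate, List.foldl] <;> push_cast <;> ring

-- ===== VERDICT (by name: the statement is the Claim_ definition above) =====
theorem get_length_without_trailing_zeros_py_spec : Claim_equal_get_length_without_trailing_zeros_py := by
  intro data _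
  unfold Spec_get_length_without_trailing_zeros_py get_length_without_trailing_zeros_py get_length_without_trailing_zeros_py_alt
  rw [pv_main_A data data.length, pv_fold data]
  ring_nf
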